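-- pv_equiv track=rewrite | github.com/MrBrantCode/unitest_baseline | mut_generate/mist_train_cf/cf_94831/solution.py | move_second_to_beginning
-- ===== SOURCE A (Python) =====
-- def move_second_to_beginning(lst):
--     if len(lst) < 2:  # Check if the list has at least 2 elements
--         return lst
--
--     second_to_last = lst[-2]  # Get the second-to-last element
--
--     # Shift all elements to the right by one position
--     for i in range(len(lst) - 1, 0, -1):
--         lst[i] = lst[i - 1]
--
--     lst[0] = second_to_last  # Place the second-to-last element at the beginning
--
--     return lst
-- ===== SOURCE B (Python) =====
-- def move_second_to_beginning(lst):
--     if len(lst) < 2:  # nothing to move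
--         return lst
--     out = []
--     prev = lst[-2]            # the value that must end up first
--     for x in lst:           # single forward pass: emit the carried value, carry x
--         out.append(prev)
--         prev = x            # the original last element is carried out and dropped
--     lst[:] = out            # mutate in place, like A
--     return lst
-- ===== Notes on version B (the rewrite author's own statement) =====
-- stated objective: alternative
-- what changed: Replaces A's in-place backward index shift (lst[i]=lst[i-1] for i descending) with a single forward pass that builds a fresh list by emitting a carried previous-value accumulator seeded with the second-to-last element (the original last element falls off the carry), then slice-assigns it back into lst.
import Mathlib
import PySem

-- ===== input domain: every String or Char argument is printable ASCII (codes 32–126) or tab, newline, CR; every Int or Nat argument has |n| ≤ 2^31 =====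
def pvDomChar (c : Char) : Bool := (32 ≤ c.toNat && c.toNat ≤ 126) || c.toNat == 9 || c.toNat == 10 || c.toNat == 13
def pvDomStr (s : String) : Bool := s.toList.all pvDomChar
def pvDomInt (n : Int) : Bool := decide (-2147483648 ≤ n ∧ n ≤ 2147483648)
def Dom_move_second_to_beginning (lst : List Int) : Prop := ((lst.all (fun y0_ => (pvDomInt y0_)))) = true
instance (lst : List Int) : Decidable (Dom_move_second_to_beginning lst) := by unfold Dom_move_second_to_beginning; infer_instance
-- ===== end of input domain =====

-- B replaces A's backward in-place index shift with one forward pass building a new list from a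
-- carried previous-value accumulator seeded with the second-to-last element; both Pythons mutate lst in place, and the
-- equivalence proved here is about the return value.

-- ===== PORT A =====
def move_second_to_beginning (lst : List Int) : List Int :=
  if lst.length < 2 then lst
  else
    let second_to_last := PySem.List.pyGetD lst (-2) 0
    let lst1 := (PySem.List.pyRange ((lst.length : Int) - 1) 0 (-1)).foldl
      (fun acc i => PySem.List.pySetD acc i (PySem.List.pyGetD acc (i - 1) 0)) lst
    PySem.List.pySetD lst1 0 second_to_last

-- ===== PORT B =====
def move_second_to_beginning_alt (lst : List Int) : List Int :=
  if lst.length < 2 then lst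
  else
    -- state (out, prev): for each x, append prev to out, then carry x
    (lst.foldl (fun (st : List Int × Int) x => (st.1 ++ [st.2], x))
      ([], PySem.List.pyGetD lst (-2) 0)).1

-- ===== PRECONDITION & SPEC =====
def Spec_move_second_to_beginning (lst : List Int) (out : List Int) : Prop := out = move_second_to_beginning_alt lst
instance (lst : List Int) (out : List Int) : Decidable (Spec_move_second_to_beginning lst out) := by unfold Spec_move_second_to_beginning; infer_instance

-- ===== CLAIM (what is proved, stated in full; the proofs are below) =====
def Claim_equal_move_second_to_beginning : Prop := ∀ (lst : List Int), Dom_move_second_to_beginning lst → Spec_move_second_to_beginning lst (move_second_to_beginning lst)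

-- ===== LEMMAS AND PROOFS =====

-- the shift loop of A: after folding down from index m, the list is x0 :: dropLast
theorem shift_loop (xs : List Int) (m : Nat) (hm : m < xs.length) :
    (PySem.List.pyRange (m : Int) 0 (-1)).foldl
      (fun acc i => PySem.List.pySetD acc i (PySem.List.pyGetD acc (i - 1) 0))
      (xs.take (m + 1) ++ (xs.drop m).dropLast)
    = xs.take 1 ++ xs.dropLast := by
  induction m with
  | zero => simp [PySem.List.pyRange_neg_one_eq_nil]
  | succ m ih =>
    have hmn : m < xs.length := by omega
    have hcons : PySem.List.pyRange ((m + 1 : Nat) : Int) 0 (-1)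
        = ((m + 1 : Nat) : Int) :: PySem.List.pyRange (((m + 1 : Nat) : Int) - 1) 0 (-1) :=
      PySem.List.pyRange_neg_one_cons (by push_cast; omega)
    have hidx : ((m + 1 : Nat) : Int) - 1 = (m : Int) := by push_cast; ring
    have hdropne : xs.drop (m + 1) ≠ [] := by
      apply List.ne_nil_of_length_pos
      simp only [List.length_drop]
      omega
    have hget : (xs.take (m + 1 + 1) ++ (xs.drop (m + 1)).dropLast).getD m 0 = xs[m] := by
      rw [List.getD_eq_getElem?_getD, List.getElem?_append_left (by
        simpa using by omega : m < (xs.take (m + 1 + 1)).length)]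
      simp [hmn]
    have hstep : (xs.take (m + 1 + 1) ++ (xs.drop (m + 1)).dropLast).set (m + 1)
        ((xs.take (m + 1 + 1) ++ (xs.drop (m + 1)).dropLast).getD m 0)
        = xs.take (m + 1) ++ (xs.drop m).dropLast := by
      rw [hget, List.set_append_left _ _ (by simpa using by omega),
        List.take_add_one, List.getElem?_eq_getElem hm,
        List.set_append_right _ _ (by simp),
        List.drop_eq_getElem_cons hmn, List.dropLast_cons_of_ne_nil hdropne]
      simp [List.length_take, Nat.min_eq_left (by omega : m + 1 ≤ xs.length)]
    rw [hcons, List.foldl_cons, hidx]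
    simp only [PySem.List.pySetD_natCast, PySem.List.pyGetD_natCast]
    rw [hstep]
    exact ih hmn

-- B's carry fold: the emitted list is acc followed by all but the last of (p :: xs)
theorem carry_fold (xs : List Int) (acc : List Int) (p : Int) :
    (xs.foldl (fun (st : List Int × Int) x => (st.1 ++ [st.2], x)) (acc, p)).1
      = acc ++ (p :: xs).dropLast := by
  induction xs generalizing acc p with
  | nil => simp
  | cons y ys ih =>
    rw [List.foldl_cons, ih,
      List.dropLast_cons_of_ne_nil (l := y :: ys) (by simp), List.append_assoc]
    simp

-- ===== VERDICT (by name: the statement is the Claim_ definition above) =====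
theorem move_second_to_beginning_spec : Claim_equal_move_second_to_beginning := by
  intro lst _
  unfold Spec_move_second_to_beginning move_second_to_beginning move_second_to_beginning_alt
  by_cases h : lst.length < 2
  · simp [h]
  · simp only [h, if_false]
    have hn : 2 ≤ lst.length := by omega
    have hne : lst ≠ [] := by intro e; rw [e] at hn; simp at hn
    have hlt : lst.length - 1 < lst.length := by omega
    have hcastr : ((lst.length : Int) - 1) = ((lst.length - 1 : Nat) : Int) := by
      rw [Nat.cast_sub (by omega)]; simp
    have hinit : lst.take ((lst.length - 1) + 1) ++ (lst.drop (lst.length - 1)).dropLast = lst := by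
      have h1 : lst.take ((lst.length - 1) + 1) = lst := List.take_of_length_le (by omega)
      have h2 : (lst.drop (lst.length - 1)).dropLast = [] := by
        apply List.eq_nil_of_length_eq_zero
        simp only [List.length_dropLast, List.length_drop]
        omega
      rw [h1, h2, List.append_nil]
    have hloop := shift_loop lst (lst.length - 1) hlt
    rw [hinit] at hloop
    rw [hcastr, hloop]
    generalize PySem.List.pyGetD lst (-2) 0 = v
    have hset : PySem.List.pySetD (lst.take 1 ++ lst.dropLast) 0 v = v :: lst.dropLast := by
      cases lst with
      | nil => simp at hn
      | cons a t => simp [pysem]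
    rw [hset, carry_fold, List.dropLast_cons_of_ne_nil hne]
    simp
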